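-- pv_equiv track=rewrite | github.com/paulscherrerinstitute/std_detector_buffer | std_buffer/eiger/std-daq_config_gen.py | get_rows_total_size
-- ===== SOURCE A (Python) =====
-- def get_rows_total_size(n_rows, initial_size):
--     y_small_gap = 2
--     y_big_gap = 8
--     total_size = initial_size
--     for row in range(n_rows):
--         if row % 2 == 1 and row < n_rows - 1:
--             total_size += y_big_gap
--         elif row % 2 == 0:
--             total_size += 3 * y_small_gap
--     return total_size
-- ===== SOURCE B (Python) =====
-- def get_rows_total_size(n_rows, initial_size):
--     # closed form: even rows each add 6; odd rows except the last row add 8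
--     if n_rows <= 0:
--         return initial_size
--     return initial_size + 6 * ((n_rows + 1) // 2) + 8 * ((n_rows - 1) // 2)
-- ===== Notes on version B (the rewrite author's own statement) =====
-- stated objective: faster
-- what changed: Replaces the O(n) loop over rows with an O(1) closed-form formula counting even rows ((n+1)//2, each adding 6) and non-final odd rows ((n-1)//2, each adding 8).
import Mathlib
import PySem

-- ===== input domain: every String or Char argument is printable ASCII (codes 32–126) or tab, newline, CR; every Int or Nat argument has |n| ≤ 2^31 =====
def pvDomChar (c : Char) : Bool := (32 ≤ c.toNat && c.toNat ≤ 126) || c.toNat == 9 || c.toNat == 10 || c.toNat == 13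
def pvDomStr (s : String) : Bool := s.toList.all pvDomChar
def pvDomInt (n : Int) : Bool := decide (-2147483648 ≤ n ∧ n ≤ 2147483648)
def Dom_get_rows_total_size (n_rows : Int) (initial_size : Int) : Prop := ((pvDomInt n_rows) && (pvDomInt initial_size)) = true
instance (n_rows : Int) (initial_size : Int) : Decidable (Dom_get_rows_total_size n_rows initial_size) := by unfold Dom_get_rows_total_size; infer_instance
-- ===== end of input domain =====

-- B replaces A's O(n) loop over rows by an O(1) closed-form count of even rows and non-final odd rows.


-- ===== PORT A =====
def get_rows_total_size (n_rows : Int) (initial_size : Int) : Int :=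
  (PySem.List.pyRange 0 n_rows 1).foldl
    (fun total_size row =>
      if PySem.Int.mod row 2 = 1 ∧ row < n_rows - 1 then total_size + 8
      else if PySem.Int.mod row 2 = 0 then total_size + 3 * 2
      else total_size)
    initial_size

-- ===== PORT B =====
def get_rows_total_size_alt (n_rows : Int) (initial_size : Int) : Int :=
  if n_rows ≤ 0 then initial_size
  else initial_size + 6 * PySem.Int.floordiv (n_rows + 1) 2
         + 8 * PySem.Int.floordiv (n_rows - 1) 2

-- ===== PRECONDITION & SPEC =====
def Spec_get_rows_total_size (n_rows : Int) (initial_size : Int) (out : Int) : Prop := out = get_rows_total_size_alt n_rows initial_size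
instance (n_rows : Int) (initial_size : Int) (out : Int) : Decidable (Spec_get_rows_total_size n_rows initial_size out) := by unfold Spec_get_rows_total_size; infer_instance

-- ===== CLAIM (what is proved, stated in full; the proofs are below) =====
def Claim_equal_get_rows_total_size : Prop := ∀ (n_rows : Int) (initial_size : Int), Dom_get_rows_total_size n_rows initial_size → Spec_get_rows_total_size n_rows initial_size (get_rows_total_size n_rows initial_size)

-- ===== LEMMAS AND PROOFS =====

-- Loop invariant for A's fold over rows 0..m-1, as long as every processed row is below n-1:
-- even rows contribute 6 each, odd rows 8 each.
theorem pv_loop_prefix (n i : Int) : ∀ (m : Nat), (m : Int) ≤ n - 1 →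
    (PySem.List.pyRange 0 (m : Int) 1).foldl
      (fun total_size row =>
        if PySem.Int.mod row 2 = 1 ∧ row < n - 1 then total_size + 8
        else if PySem.Int.mod row 2 = 0 then total_size + 3 * 2
        else total_size)
      i
    = i + 6 * (((m + 1) / 2 : Nat) : Int) + 8 * ((m / 2 : Nat) : Int) := by
  intro m
  induction m with
  | zero =>
    intro _
    simp [PySem.List.pyRange_one_eq_nil (by omega : (0:Int) ≤ 0)]
  | succ k ih =>
    intro h
    have hk : (k : Int) ≤ n - 1 := by push_cast at h ⊢; omega
    have hsplit : PySem.List.pyRange 0 ((k:Int) + 1) 1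
        = PySem.List.pyRange 0 (k:Int) 1 ++ [(k:Int)] :=
      PySem.List.pyRange_one_succ_right (by omega)
    have hcast : ((k + 1 : Nat) : Int) = (k : Int) + 1 := by push_cast; ring
    rw [hcast, hsplit, List.foldl_append, ih hk]
    simp only [List.foldl_cons, List.foldl_nil]
    rw [PySem.Int.mod_eq_emod_of_pos (by omega : (0:Int) < 2)]
    split_ifs with h1 h2 <;> push_cast <;> omega

theorem get_rows_total_size_eq_alt (n i : Int) :
    get_rows_total_size n i = get_rows_total_size_alt n i := by
  unfold get_rows_total_size get_rows_total_size_alt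
  by_cases hn : n ≤ 0
  · rw [PySem.List.pyRange_one_eq_nil hn]
    simp [hn]
  · push Not at hn
    set m : Nat := (n - 1).toNat with hm
    have hmn : (m : Int) = n - 1 := by omega
    have hsplit : PySem.List.pyRange 0 n 1
        = PySem.List.pyRange 0 (m:Int) 1 ++ [(m:Int)] := by
      rw [show n = (m:Int) + 1 by omega]
      exact PySem.List.pyRange_one_succ_right (by omega)
    rw [hsplit, List.foldl_append, pv_loop_prefix n i m (by omega)]
    simp only [List.foldl_cons, List.foldl_nil]
    simp only [PySem.Int.mod_eq_emod_of_pos (by omega : (0:Int) < 2),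
      PySem.Int.floordiv_eq_ediv_of_pos (by omega : (0:Int) < 2)]
    split_ifs with h1 h2 <;> omega

-- ===== VERDICT (by name: the statement is the Claim_ definition above) =====
theorem get_rows_total_size_spec : Claim_equal_get_rows_total_size := by
  intro n i _
  exact get_rows_total_size_eq_alt n i
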